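-- pv_equiv track=rewrite | github.com/hummingbot/hummingbot | .venv/lib/python3.9/site-packages/ptpython/utils.py | _common_whitespace_prefix
-- ===== SOURCE A (Python) =====
-- from typing import TYPE_CHECKING, Any, Callable, Iterable, TypeVar, cast
--
-- def _common_whitespace_prefix(strings: Iterable[str]) -> str:
--     """
--     Return common prefix for a list of lines.
--     This will ignore lines that contain whitespace only.
--     """
--     # Ignore empty lines and lines that have whitespace only.
--     strings = [s for s in strings if not s.isspace() and not len(s) == 0]
--
--     if not strings:
--         return ""
--
--     else:
--         s1 = min(strings)
--         s2 = max(strings)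
--
--         for i, c in enumerate(s1):
--             if c != s2[i] or c not in " \t":
--                 return s1[:i]
--
--         return s1
-- ===== SOURCE B (Python) =====
-- def _common_whitespace_prefix(strings):
--     """Common whitespace prefix via a running common-prefix fold (no min/max trick)."""
--     lines = [s for s in strings if not s.isspace() and not len(s) == 0]
--     if not lines:
--         return ""
--     prefix = list(lines[0])
--     for s in lines[1:]:
--         new = []
--         for a, b in zip(prefix, s):
--             if a != b:
--                 break
--             new.append(a)
--         prefix = new
--     out = []
--     for c in prefix:
--         if not (c == ' ' or c == '\t'):
--             break
--         out.append(c)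
--     return "".join(out)
-- ===== Notes on version B (the rewrite author's own statement) =====
-- stated objective: alternative
-- what changed: Replaces A's lexicographic min/max bounding trick (scan only min vs max with indexed access) by a direct running common-prefix fold over all kept lines followed by a whitespace-truncation pass.
import Mathlib
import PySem

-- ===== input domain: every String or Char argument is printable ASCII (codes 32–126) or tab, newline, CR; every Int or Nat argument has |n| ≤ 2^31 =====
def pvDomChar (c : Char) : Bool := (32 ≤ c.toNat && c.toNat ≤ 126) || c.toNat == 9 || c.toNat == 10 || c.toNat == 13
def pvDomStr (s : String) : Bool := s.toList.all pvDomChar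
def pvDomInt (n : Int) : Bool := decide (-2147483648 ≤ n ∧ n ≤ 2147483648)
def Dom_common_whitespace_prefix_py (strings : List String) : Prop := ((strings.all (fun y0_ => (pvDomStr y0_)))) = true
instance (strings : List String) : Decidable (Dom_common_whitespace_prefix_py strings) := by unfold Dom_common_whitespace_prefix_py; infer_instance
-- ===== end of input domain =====

-- B replaces A's min/max lexicographic-bounding trick by a direct running common-prefix fold over all kept lines (objective: alternative; same asymptotic cost).

-- the filter 'strings = [s for s in strings if not s.isspace() and not len(s) == 0]' (identical in A and B)
def pvKept (strings : List String) : List String :=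
  strings.filter (fun s => !(PySem.Str.strIsspace s) && !(PySem.Str.len s == 0))

-- ===== PORT A =====
-- 'for i, c in enumerate(s1): if c != s2[i] or c not in " \t": return s1[:i]';
-- falling off the end returns s1 itself
def pvLoopA (s1full s2 : List Char) : List Char → Nat → String
  | [], _ => String.ofList s1full
  | c :: rest, i =>
    match PySem.List.pyGet? s2 (i : Int) with
    | none => ""   -- Python would raise IndexError here; unreachable since s1 = min ≤ max = s2
    | some d =>
      if c ≠ d ∨ ¬ (c = ' ' ∨ c = '\t') then String.ofList (s1full.take i)
      else pvLoopA s1full s2 rest (i + 1)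

def common_whitespace_prefix_py (strings : List String) : String :=
  match PySem.List.min? (pvKept strings) (fun s => s), PySem.List.max? (pvKept strings) (fun s => s) with
  | some s1, some s2 => pvLoopA s1.toList s2.toList s1.toList 0
  | _, _ => ""   -- the filtered list is empty: 'if not strings: return ""'

-- ===== PORT B =====
-- character-wise common prefix of two lines (the inner zip loop of Source B)
def pvLcp : List Char → List Char → List Char
  | a :: as, b :: bs => if a = b then a :: pvLcp as bs else []
  | _, _ => []

-- truncate at the first character that is not ' ' or '\t' (the final loop of Source B)
def pvWsTake : List Char → List Char
  | [] => []
  | c :: cs => if c = ' ' ∨ c = '\t' then c :: pvWsTake cs else []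

def common_whitespace_prefix_py_alt (strings : List String) : String :=
  match pvKept strings with
  | [] => ""
  | l0 :: rest => String.ofList (pvWsTake (rest.foldl (fun p s => pvLcp p s.toList) l0.toList))

-- ===== PRECONDITION & SPEC =====
def Spec_common_whitespace_prefix_py (strings : List String) (out : String) : Prop := out = common_whitespace_prefix_py_alt strings
instance (strings : List String) (out : String) : Decidable (Spec_common_whitespace_prefix_py strings out) := by unfold Spec_common_whitespace_prefix_py; infer_instance

-- ===== CLAIM (what is proved, stated in full; the proofs are below) =====
def Claim_equal_common_whitespace_prefix_py : Prop := ∀ (strings : List String), Dom_common_whitespace_prefix_py strings → Spec_common_whitespace_prefix_py strings (common_whitespace_prefix_py strings)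

-- ===== LEMMAS AND PROOFS =====

theorem pvLcp_prefix_left (a b : List Char) : pvLcp a b <+: a := by
  induction a generalizing b with
  | nil => simp [pvLcp]
  | cons x xs ih =>
    cases b with
    | nil => simp [pvLcp]
    | cons y ys =>
      simp only [pvLcp]
      split
      · next h => exact List.cons_prefix_cons.mpr ⟨rfl, ih ys⟩
      · simp

theorem pvLcp_prefix_right (a b : List Char) : pvLcp a b <+: b := by
  induction a generalizing b with
  | nil => simp [pvLcp]
  | cons x xs ih =>
    cases b with
    | nil => simp [pvLcp]
    | cons y ys =>
      simp only [pvLcp]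
      split
      · next h => subst h; exact List.cons_prefix_cons.mpr ⟨rfl, ih ys⟩
      · simp

theorem prefix_pvLcp {p a b : List Char} (ha : p <+: a) (hb : p <+: b) : p <+: pvLcp a b := by
  induction p generalizing a b with
  | nil => simp
  | cons x xs ih =>
    cases a with
    | nil => simp at ha
    | cons y ys =>
      cases b with
      | nil => simp at hb
      | cons z zs =>
        obtain ⟨hx, ha'⟩ := List.cons_prefix_cons.mp ha
        obtain ⟨hz, hb'⟩ := List.cons_prefix_cons.mp hb
        subst hx; subst hz
        simp only [pvLcp, if_pos rfl]
        exact List.cons_prefix_cons.mpr ⟨rfl, ih ha' hb'⟩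

-- a common prefix of the lexicographic min and max is a prefix of everything between them
theorem prefix_of_between {p a b s : List Char} (ha : p <+: a) (hb : p <+: b)
    (h1 : ¬ List.Lex (· < ·) s a) (h2 : ¬ List.Lex (· < ·) b s) : p <+: s := by
  induction p generalizing a b s with
  | nil => simp
  | cons x xs ih =>
    cases a with
    | nil => simp at ha
    | cons y ys =>
      cases b with
      | nil => simp at hb
      | cons z zs =>
        obtain ⟨hx, ha'⟩ := List.cons_prefix_cons.mp ha
        obtain ⟨hz, hb'⟩ := List.cons_prefix_cons.mp hb
        subst hx; subst hz
        cases s with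
        | nil => exact absurd List.Lex.nil h1
        | cons w ws =>
          have hwx : w = x := by
            rcases lt_trichotomy w x with h | h | h
            · exact absurd (List.Lex.rel h) h1
            · exact h
            · exact absurd (List.Lex.rel h) h2
          subst hwx
          have h1' : ¬ List.Lex (· < ·) ws ys := fun h => h1 (List.Lex.cons h)
          have h2' : ¬ List.Lex (· < ·) zs ws := fun h => h2 (List.Lex.cons h)
          exact List.cons_prefix_cons.mpr ⟨rfl, ih ha' hb' h1' h2'⟩

-- the fold computes a common prefix of its seed and all folded-in lines …
theorem foldl_lcp_prefix (L : List String) (acc : List Char) :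
    (L.foldl (fun p s => pvLcp p s.toList) acc) <+: acc ∧
    ∀ s ∈ L, (L.foldl (fun p s => pvLcp p s.toList) acc) <+: s.toList := by
  induction L generalizing acc with
  | nil => simp
  | cons x xs ih =>
    simp only [List.foldl_cons]
    obtain ⟨h1, h2⟩ := ih (pvLcp acc x.toList)
    refine ⟨h1.trans (pvLcp_prefix_left _ _), ?_⟩
    intro s hs
    rcases List.mem_cons.mp hs with rfl | hs
    · exact h1.trans (pvLcp_prefix_right _ _)
    · exact h2 s hs

-- … and the greatest one
theorem prefix_foldl_lcp {p : List Char} (L : List String) (acc : List Char)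
    (hacc : p <+: acc) (hL : ∀ s ∈ L, p <+: s.toList) :
    p <+: L.foldl (fun p s => pvLcp p s.toList) acc := by
  induction L generalizing acc with
  | nil => simpa using hacc
  | cons x xs ih =>
    simp only [List.foldl_cons]
    exact ih _ (prefix_pvLcp hacc (hL x (by simp))) (fun s hs => hL s (List.mem_cons_of_mem _ hs))

-- A's scanning loop, from position i with all earlier positions matched and whitespace
theorem pvLoopA_go (s1 s2 : List Char) (hnp : ¬ (s2 <+: s1 ∧ s2.length < s1.length)) :
    ∀ l i, l = s1.drop i → s1.take i = s2.take i → (∀ c ∈ s1.take i, c = ' ' ∨ c = '\t') →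
    pvLoopA s1 s2 l i = String.ofList (s1.take i ++ pvWsTake (pvLcp (s1.drop i) (s2.drop i))) := by
  intro l
  induction l with
  | nil =>
    intro i hl _ _
    have hi : s1.length ≤ i := by
      by_contra h
      push_neg at h
      have := List.drop_eq_nil_iff.mp hl.symm
      omega
    rw [pvLoopA, ← hl, List.take_of_length_le hi]
    simp [pvLcp, pvWsTake]
  | cons c rest ih =>
    intro i hl htake hws
    have hi : i < s1.length := by
      by_contra h
      push_neg at h
      rw [List.drop_eq_nil_iff.mpr h] at hl
      simp at hl
    have hdrop : s1.drop i = s1[i] :: s1.drop (i + 1) := List.drop_eq_getElem_cons hi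
    have hc : c = s1[i] ∧ rest = s1.drop (i + 1) := by
      rw [hdrop] at hl; exact ⟨(List.cons.injEq _ _ _ _ ▸ hl).1, (List.cons.injEq _ _ _ _ ▸ hl).2⟩
    obtain ⟨hc1, hc2⟩ := hc
    rw [pvLoopA]
    rw [PySem.List.pyGet?_natCast]
    by_cases hi2 : i < s2.length
    · have hdrop2 : s2.drop i = s2[i] :: s2.drop (i + 1) := List.drop_eq_getElem_cons hi2
      rw [List.getElem?_eq_getElem hi2]
      simp only []
      by_cases hstop : c ≠ s2[i] ∨ ¬ (c = ' ' ∨ c = '\t')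
      · rw [if_pos hstop]
        congr 1
        rw [hdrop, hdrop2, ← hc1]
        rcases hstop with h | h
        · rw [pvLcp, if_neg h]
          simp [pvWsTake]
        · by_cases he : c = s2[i]
          · rw [pvLcp, if_pos he, pvWsTake, if_neg h]
            simp
          · rw [pvLcp, if_neg he]
            simp [pvWsTake]
      · rw [if_neg hstop]
        push_neg at hstop
        obtain ⟨he, hwsc⟩ := hstop
        have htake' : s1.take (i + 1) = s2.take (i + 1) := by
          rw [List.take_succ, List.take_succ, htake,
            List.getElem?_eq_getElem hi, List.getElem?_eq_getElem hi2, ← hc1, he]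
        have hws' : ∀ x ∈ s1.take (i + 1), x = ' ' ∨ x = '\t' := by
          intro x hx
          rw [List.take_succ, List.getElem?_eq_getElem hi] at hx
          rcases List.mem_append.mp hx with h | h
          · exact hws x h
          · simp at h; subst h; rw [← hc1]; exact hwsc
        rw [ih (i + 1) hc2 htake' hws']
        congr 1
        rw [List.take_succ, List.getElem?_eq_getElem hi, hdrop, hdrop2, ← hc1, ← he,
          pvLcp, if_pos rfl, pvWsTake, if_pos hwsc]
        simp
    · exfalso
      apply hnp
      push_neg at hi2
      have h2 : s2.take i = s2 := List.take_of_length_le hi2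
      have hlen : (s1.take i).length = i := by
        rw [List.length_take]; omega
      constructor
      · rw [← h2, ← htake]; exact List.take_prefix _ _
      · rw [← h2, ← htake, hlen]; exact hi

-- A's loop computes pvWsTake (pvLcp s1 s2) when s2 is not a proper prefix of s1
theorem pvLoopA_eq (s1 s2 : List Char) (hnp : ¬ (s2 <+: s1 ∧ s2.length < s1.length)) :
    pvLoopA s1 s2 s1 0 = String.ofList (pvWsTake (pvLcp s1 s2)) := by
  have := pvLoopA_go s1 s2 hnp s1 0 (by simp) (by simp) (by simp)
  simpa using this

theorem pv_prefix_antisymm (p l : List Char) (h1 : p <+: l) (h2 : l <+: p) : p = l :=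
  h1.eq_of_length_le h2.length_le

theorem pv_lex_of_proper_prefix (p : List Char) (c : Char) (cs : List Char) :
    List.Lex (· < ·) p (p ++ c :: cs) := by
  induction p with
  | nil => exact List.Lex.nil
  | cons x xs ih => exact List.Lex.cons ih

-- ===== VERDICT (by name: the statement is the Claim_ definition above) =====
theorem common_whitespace_prefix_py_spec : Claim_equal_common_whitespace_prefix_py := by
  intro strings _
  unfold Spec_common_whitespace_prefix_py common_whitespace_prefix_py common_whitespace_prefix_py_alt
  cases hk : pvKept strings with
  | nil =>
    rw [(PySem.List.min?_eq_none_iff _ _).mpr rfl]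
  | cons l0 rest =>
    cases hmin : PySem.List.min? (l0 :: rest) (fun s => s) with
    | none => rw [PySem.List.min?_eq_none_iff] at hmin; cases hmin
    | some s1 =>
    cases hmax : PySem.List.max? (l0 :: rest) (fun s => s) with
    | none => rw [PySem.List.max?_eq_none_iff] at hmax; cases hmax
    | some s2 =>
    have hs1mem := PySem.List.min?_mem hmin
    have hs2mem := PySem.List.max?_mem hmax
    have hs1min := PySem.List.min?_isMin hmin
    have hs2max := PySem.List.max?_isMax hmax
    -- ¬ (a < min) and ¬ (max < a), as list-lex statements
    have hnotlt1 : ∀ s ∈ l0 :: rest, ¬ List.Lex (· < ·) s.toList s1.toList := by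
      intro s hs h
      exact absurd (String.lt_iff_toList_lt.mpr h) (not_lt.mpr (hs1min s hs))
    have hnotlt2 : ∀ s ∈ l0 :: rest, ¬ List.Lex (· < ·) s2.toList s.toList := by
      intro s hs h
      exact absurd (String.lt_iff_toList_lt.mpr h) (not_lt.mpr (hs2max s hs))
    -- s2 is not a proper prefix of s1 (it would be lexicographically smaller)
    have hnp : ¬ (s2.toList <+: s1.toList ∧ s2.toList.length < s1.toList.length) := by
      rintro ⟨⟨t, ht⟩, hlen⟩
      cases t with
      | nil => simp [← ht] at hlen
      | cons c cs =>
        exact hnotlt1 s2 hs2mem (by rw [← ht]; exact pv_lex_of_proper_prefix s2.toList c cs)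
    show pvLoopA s1.toList s2.toList s1.toList 0 =
      String.ofList (pvWsTake (rest.foldl (fun p s => pvLcp p s.toList) l0.toList))
    rw [pvLoopA_eq _ _ hnp]
    -- the two character lists coincide: each is a prefix of the other
    have hfold := foldl_lcp_prefix rest l0.toList
    have hall : ∀ s ∈ l0 :: rest, (rest.foldl (fun p s => pvLcp p s.toList) l0.toList) <+: s.toList := by
      intro s hs
      rcases List.mem_cons.mp hs with rfl | hs
      · exact hfold.1
      · exact hfold.2 s hs
    have h1 : (rest.foldl (fun p s => pvLcp p s.toList) l0.toList) <+: pvLcp s1.toList s2.toList :=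
      prefix_pvLcp (hall s1 hs1mem) (hall s2 hs2mem)
    have h2 : pvLcp s1.toList s2.toList <+: rest.foldl (fun p s => pvLcp p s.toList) l0.toList := by
      refine prefix_foldl_lcp rest l0.toList ?_ ?_
      · exact prefix_of_between (pvLcp_prefix_left _ _) (pvLcp_prefix_right _ _)
          (hnotlt1 l0 (by simp)) (hnotlt2 l0 (by simp))
      · intro s hs
        exact prefix_of_between (pvLcp_prefix_left _ _) (pvLcp_prefix_right _ _)
          (hnotlt1 s (List.mem_cons_of_mem _ hs)) (hnotlt2 s (List.mem_cons_of_mem _ hs))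
    rw [pv_prefix_antisymm _ _ h2 h1]
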